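-- pv_equiv track=rewrite | github.com/Hybrid-Soda/Algorithm-Practice | Solve/programmers/389479_서버 증설 횟수.py | solution
-- ===== SOURCE A (Python) =====
-- def solution(players, m, k):
--     answer = 0
--     servers = []
--
--     # 시뮬레이션 시작
--     for users in players:
--         # 증설이 필요한 서버 개수 체크
--         servers_req = users // m
--         diff = servers_req - len(servers)
--
--         # 현재 서버 개수와 비교해 부족하면 증설 + 증설된 서버 개수 체크
--         if diff > 0:
--             servers.extend([k] * diff)
--             answer += diff
--
--         # 서버 별로 순회하면서 남은 시간 차감
--         d = -1
--         for i in range(len(servers)):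
--             servers[i] -= 1
--
--             if servers[i] <= 0:
--                 d = i
--
--         # 남은 시간이 0인 서버 축소
--         servers = servers[d+1:]
--
--     return answer
-- ===== SOURCE B (Python) =====
-- def solution(players, m, k):
--     # Group servers by their expiry hour and keep a running active count,
--     # instead of decrementing every server every hour.
--     answer = 0
--     active = 0
--     adds = []  # queue of (expiry_hour, count), oldest (smallest expiry) first
--     for t, users in enumerate(players):
--         while adds and adds[0][0] <= t:
--             active -= adds.pop(0)[1]
--         need = users // m - active
--         if need > 0:
--             adds.append((t + k, need))
--             active += need
--             answer += need
--     return answer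
-- ===== Notes on version B (the rewrite author's own statement) =====
-- stated objective: faster
-- what changed: Instead of keeping one list entry per server and decrementing every server every hour (then slicing off the expired prefix), B keeps a queue of (expiry_hour, count) groups plus a running active-server count, popping whole expired groups from the front; per-server work disappears.
import Mathlib
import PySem

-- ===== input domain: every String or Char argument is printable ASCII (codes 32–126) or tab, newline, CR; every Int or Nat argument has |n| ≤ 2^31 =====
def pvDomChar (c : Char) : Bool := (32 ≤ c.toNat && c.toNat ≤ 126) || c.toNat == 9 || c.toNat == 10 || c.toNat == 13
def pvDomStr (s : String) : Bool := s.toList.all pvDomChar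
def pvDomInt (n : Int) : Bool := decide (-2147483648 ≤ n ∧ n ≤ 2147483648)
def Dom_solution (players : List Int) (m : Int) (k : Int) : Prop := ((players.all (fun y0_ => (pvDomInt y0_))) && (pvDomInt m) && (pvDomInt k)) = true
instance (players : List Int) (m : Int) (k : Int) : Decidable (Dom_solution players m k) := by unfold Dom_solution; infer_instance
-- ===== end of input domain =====

-- B replaces A's per-server decrement list by a queue of (expiry_hour, count) groups with a
-- running active count (a faster algorithm); return values proved equal whenever m ≠ 0.

-- ===== PORT A =====
-- Python's in-place loop `for i in range(len(servers)): servers[i] -= 1; if servers[i] <= 0: d = i`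
-- ported as a structural recursion carrying the current index i and d: each Python iteration
-- touches only index i, so the element-wise rewrite computes the same list and the same d (exact).
def decLoop : List Int → Int → Int → List Int × Int
  | [], _, d => ([], d)
  | x :: rest, i, d =>
    let x' := x - 1
    let d' := if x' ≤ 0 then i else d
    let r := decLoop rest (i + 1) d'
    (x' :: r.1, r.2)

def stepA (m k : Int) (st : Int × List Int) (users : Int) : Int × List Int :=
  let servers_req := PySem.Int.floordiv users m
  let diff := servers_req - (st.2.length : Int)
  let servers := if diff > 0 then st.2 ++ List.replicate diff.toNat k else st.2
  let answer := if diff > 0 then st.1 + diff else st.1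
  let r := decLoop servers 0 (-1)
  (answer, PySem.List.slice r.1 (some (r.2 + 1)) none)

def solution (players : List Int) (m : Int) (k : Int) : Int :=
  (players.foldl (stepA m k) (0, [])).1

-- ===== PORT B =====
-- `while adds and adds[0][0] <= t: active -= adds.pop(0)[1]` as structural recursion on the queue
def popExpired (t : Int) : List (Int × Int) → Int → List (Int × Int) × Int
  | [], active => ([], active)
  | g :: rest, active =>
    if g.1 ≤ t then popExpired t rest (active - g.2) else (g :: rest, active)

def stepB (m k : Int) (st : Int × Int × List (Int × Int)) (p : Int × Int) : Int × Int × List (Int × Int) :=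
  let r := popExpired p.1 st.2.2 st.2.1
  let need := PySem.Int.floordiv p.2 m - r.2
  if need > 0 then (st.1 + need, r.2 + need, r.1 ++ [(p.1 + k, need)])
  else (st.1, r.2, r.1)

def solution_alt (players : List Int) (m : Int) (k : Int) : Int :=
  ((PySem.List.enumerate players 0).foldl (stepB m k) (0, 0, [])).1

-- ===== PRECONDITION & SPEC =====
-- Pre_ excludes exactly m = 0 with a nonempty players list, where Python's `users // m`
-- raises ZeroDivisionError in both A and B (with players = [] the loop never runs, so m = 0 is fine).
def Pre_solution (players : List Int) (m : Int) (k : Int) : Prop := players = [] ∨ m ≠ 0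
instance (players : List Int) (m : Int) (k : Int) : Decidable (Pre_solution players m k) := by
  unfold Pre_solution; infer_instance
def pvWitness_solution : List Int × Int × Int := ([10, 5, 0, 7], 3, 2)

def Spec_solution (players : List Int) (m : Int) (k : Int) (out : Int) : Prop := out = solution_alt players m k
instance (players : List Int) (m : Int) (k : Int) (out : Int) : Decidable (Spec_solution players m k out) := by unfold Spec_solution; infer_instance

-- ===== CLAIM (what is proved, stated in full; the proofs are below) =====
def Claim_equal_solution : Prop := ∀ (players : List Int) (m : Int) (k : Int), Dom_solution players m k → Pre_solution players m k → Spec_solution players m k (solution players m k)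

-- ===== LEMMAS AND PROOFS =====

-- a group (expiry, count) seen at hour t is count servers each with expiry - t hours left
def groupRep (t : Int) (g : Int × Int) : List Int := List.replicate g.2.toNat (g.1 - t)

-- A's servers list at the top of hour t, reconstructed from B's queue
def reprS (t : Int) (adds : List (Int × Int)) : List Int :=
  (adds.filter (fun g => decide (t < g.1))).flatMap (groupRep t)

lemma decLoop_gt (Q : List Int) : ∀ (i d : Int), (∀ x ∈ Q, 1 < x) →
    decLoop Q i d = (Q.map (· - 1), d) := by
  induction Q with
  | nil => intro i d _; rfl
  | cons x rest ih =>
    intro i d h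
    have hx : ¬ (x - 1 ≤ 0) := by have := h x (by simp); omega
    simp [decLoop, hx, ih (i + 1) d (fun y hy => h y (by simp [hy]))]

lemma decLoop_split (P : List Int) : ∀ (Q : List Int) (i d : Int),
    (∀ x ∈ P, x ≤ 1) → (∀ x ∈ Q, 1 < x) →
    decLoop (P ++ Q) i d
      = ((P ++ Q).map (· - 1), if P.isEmpty then d else i + P.length - 1) := by
  induction P with
  | nil => intro Q i d _ hQ; simpa using decLoop_gt Q i d hQ
  | cons x P' ih =>
    intro Q i d hP hQ
    have hx : x - 1 ≤ 0 := by have := hP x (by simp); omega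
    have := ih Q (i + 1) i (fun y hy => hP y (by simp [hy])) hQ
    simp only [List.cons_append, decLoop, hx, if_pos, List.map_cons] at *
    rw [this]
    rcases P' with _ | ⟨z, P''⟩ <;> simp <;> ring

lemma slice_decLoop (P Q : List Int)
    (hP : ∀ x ∈ P, x ≤ 1) (hQ : ∀ x ∈ Q, 1 < x) :
    PySem.List.slice (decLoop (P ++ Q) 0 (-1)).1 (some ((decLoop (P ++ Q) 0 (-1)).2 + 1)) none
      = Q.map (· - 1) := by
  rw [decLoop_split P Q 0 (-1) hP hQ]
  rcases P with _ | ⟨x, P'⟩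
  · simp [PySem.List.slice_none_none]
  · have hlen : ((if (x :: P').isEmpty then (-1 : Int) else 0 + ((x :: P').length : Int) - 1)) + 1
        = (((x :: P').length : Nat) : Int) := by
      simp
    rw [hlen, PySem.List.slice_from_natCast, List.map_append]
    rw [show ((x :: P').length) = ((x :: P').map (· - 1)).length by simp]
    exact List.drop_left

lemma pop_spec (t : Int) (adds : List (Int × Int)) : ∀ (active : Int),
    adds.Pairwise (fun a b => a.1 ≤ b.1) →
    popExpired t adds active
      = (adds.filter (fun g => decide (t < g.1)),
         active - ((adds.filter (fun g => decide (g.1 ≤ t))).map (·.2)).sum) := by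
  induction adds with
  | nil => intro active _; simp [popExpired]
  | cons g rest ih =>
    intro active hp
    by_cases hg : g.1 ≤ t
    · have hng : ¬ (t < g.1) := by omega
      rw [popExpired, if_pos hg, ih (active - g.2) hp.of_cons]
      simp only [List.filter_cons, hng, decide_false, hg, decide_true, if_false, if_true,
        Bool.false_eq_true, List.map_cons, List.sum_cons]
      congr 1
      ring
    · have hrest : ∀ h ∈ rest, t < h.1 := by
        intro h hh
        have := (List.pairwise_cons.mp hp).1 h hh
        omega
      have h1 : List.filter (fun g => decide (t < g.1)) (g :: rest) = g :: rest := by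
        apply List.filter_eq_self.mpr
        intro a ha
        rcases List.mem_cons.mp ha with h | h
        · subst h; simpa using by omega
        · simpa using hrest a h
      have h2 : List.filter (fun g => decide (g.1 ≤ t)) (g :: rest) = [] := by
        apply List.filter_eq_nil_iff.mpr
        intro a ha
        rcases List.mem_cons.mp ha with h | h
        · subst h; simpa using by omega
        · simpa using by have := hrest a h; omega
      simp [popExpired, hg, h1, h2]

lemma sorted_partition (adds : List (Int × Int)) (c : Int)
    (hp : adds.Pairwise (fun a b => a.1 ≤ b.1)) :
    ∃ G₁ G₂, adds = G₁ ++ G₂ ∧ (∀ g ∈ G₁, g.1 ≤ c) ∧ (∀ g ∈ G₂, c < g.1) ∧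
      adds.filter (fun g => decide (c < g.1)) = G₂ := by
  induction adds with
  | nil => exact ⟨[], [], by simp⟩
  | cons g rest ih =>
    by_cases hg : g.1 ≤ c
    · obtain ⟨G₁, G₂, heq, h1, h2, h3⟩ := ih hp.of_cons
      refine ⟨g :: G₁, G₂, by simp [heq], ?_, h2, ?_⟩
      · intro a ha; rcases List.mem_cons.mp ha with h | h
        · subst h; exact hg
        · exact h1 a h
      · have hng : ¬ (c < g.1) := by omega
        simp [List.filter_cons, hng, h3]
    · have hrest : ∀ h ∈ rest, c < h.1 := by
        intro h hh
        have := (List.pairwise_cons.mp hp).1 h hh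
        omega
      refine ⟨[], g :: rest, by simp, by simp, ?_, ?_⟩
      · intro a ha; rcases List.mem_cons.mp ha with h | h
        · subst h; omega
        · exact hrest a h
      · apply List.filter_eq_self.mpr
        intro a ha
        rcases List.mem_cons.mp ha with h | h
        · subst h; simpa using by omega
        · simpa using hrest a h

lemma length_flatMap_rep (t : Int) (G : List (Int × Int)) (h : ∀ g ∈ G, 0 < g.2) :
    ((G.flatMap (groupRep t)).length : Int) = (G.map (·.2)).sum := by
  induction G with
  | nil => simp
  | cons g rest ih =>
    have hg : 0 < g.2 := h g (by simp)
    simp only [List.flatMap_cons, List.length_append, List.map_cons, List.sum_cons, groupRep,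
      List.length_replicate]
    rw [← ih (fun a ha => h a (by simp [ha]))]
    push_cast
    omega

lemma mem_flatMap_rep {t : Int} {G : List (Int × Int)} {x : Int} (hx : x ∈ G.flatMap (groupRep t)) :
    ∃ g ∈ G, x = g.1 - t := by
  obtain ⟨g, hg, hx⟩ := List.mem_flatMap.mp hx
  exact ⟨g, hg, List.eq_of_mem_replicate hx⟩

lemma map_flatMap_rep (t : Int) (G : List (Int × Int)) :
    (G.flatMap (groupRep t)).map (· - 1) = G.flatMap (groupRep (t + 1)) := by
  induction G with
  | nil => rfl
  | cons g rest ih =>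
    simp only [List.flatMap_cons, List.map_append, ih, groupRep, List.map_replicate]
    congr 2
    ring

lemma main_lemma (m k : Int) (rest : List Int) : ∀ (t : Int) (adds : List (Int × Int)) (answer : Int),
    adds.Pairwise (fun a b => a.1 ≤ b.1) → (∀ g ∈ adds, 0 < g.2 ∧ g.1 < t + k) →
    (rest.foldl (stepA m k) (answer, reprS t adds)).1
      = ((PySem.List.enumerate rest t).foldl (stepB m k) (answer, (adds.map (·.2)).sum, adds)).1 := by
  induction rest with
  | nil => intro t adds answer _ _; simp [PySem.List.enumerate]
  | cons users rest ih =>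
    intro t adds answer hsort hinv
    rw [PySem.List.enumerate_cons, List.foldl_cons, List.foldl_cons]
    -- decompose adds at hour t
    obtain ⟨G₁, G₂, heq, hG₁, hG₂, hfil⟩ := sorted_partition adds t hsort
    have hG₂sub : ∀ g ∈ G₂, g ∈ adds := by intro g hg; rw [heq]; exact List.mem_append_right _ hg
    have hG₂sort : G₂.Pairwise (fun a b => a.1 ≤ b.1) := by
      rw [heq] at hsort; exact (List.pairwise_append.mp hsort).2.1
    -- B's pop
    have hpop : popExpired t adds ((adds.map (·.2)).sum) = (G₂, (G₂.map (·.2)).sum) := by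
      rw [pop_spec t adds _ hsort, hfil]
      congr 1
      have h1 : adds.filter (fun g => decide (g.1 ≤ t)) = G₁ := by
        rw [heq, List.filter_append]
        rw [List.filter_eq_self.mpr (by intro a ha; simpa using hG₁ a ha),
            List.filter_eq_nil_iff.mpr (by intro a ha; simpa using by have := hG₂ a ha; omega)]
        simp
      rw [h1, heq]
      simp
    -- A's servers list at hour t and its length
    have hrepr : reprS t adds = G₂.flatMap (groupRep t) := by rw [reprS, hfil]
    have hlen : ((reprS t adds).length : Int) = (G₂.map (·.2)).sum := by
      rw [hrepr]; exact length_flatMap_rep t G₂ (fun g hg => (hinv g (hG₂sub g hg)).1)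
    set need := PySem.Int.floordiv users m - (G₂.map (·.2)).sum with hneed
    -- the queue after this hour
    set adds₁ := if need > 0 then G₂ ++ [(t + k, need)] else G₂ with hadds₁
    have hinv₁ : ∀ g ∈ adds₁, 0 < g.2 ∧ g.1 < (t + 1) + k := by
      intro g hg
      rw [hadds₁] at hg
      by_cases hn : need > 0 <;> simp [hn] at hg
      · rcases hg with hg | hg
        · have := hinv g (hG₂sub g hg); omega
        · rw [hg]; simp; omega
      · have := hinv g (hG₂sub g hg); omega
    have hsort₁ : adds₁.Pairwise (fun a b => a.1 ≤ b.1) := by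
      rw [hadds₁]
      by_cases hn : need > 0 <;> simp [hn]
      · rw [List.pairwise_append]
        refine ⟨hG₂sort, by simp, ?_⟩
        intro a ha b hb
        simp at hb
        rw [hb]
        have := (hinv a (hG₂sub a ha)).2
        omega
      · exact hG₂sort
    -- A's servers after the optional extension
    have hservers :
        (if (PySem.Int.floordiv users m - ((reprS t adds).length : Int)) > 0
          then reprS t adds ++ List.replicate (PySem.Int.floordiv users m - ((reprS t adds).length : Int)).toNat k
          else reprS t adds) = adds₁.flatMap (groupRep t) := by
      rw [hlen, ← hneed, hadds₁, hrepr]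
      by_cases hn : need > 0 <;> simp [hn]
      rw [groupRep]
      congr 1
      ring
    -- partition adds₁ at hour t+1 and run A's inner loop
    obtain ⟨H₁, H₂, heq₁, hH₁, hH₂, hfil₁⟩ := sorted_partition adds₁ (t + 1) hsort₁
    have hsliced :
        PySem.List.slice (decLoop (adds₁.flatMap (groupRep t)) 0 (-1)).1
            (some ((decLoop (adds₁.flatMap (groupRep t)) 0 (-1)).2 + 1)) none
          = reprS (t + 1) adds₁ := by
      have hfil₁' := hfil₁
      rw [heq₁] at hfil₁'
      rw [reprS, heq₁, List.flatMap_append]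
      rw [slice_decLoop _ _
        (by intro x hx; obtain ⟨g, hg, hxg⟩ := mem_flatMap_rep hx; have := hH₁ g hg; omega)
        (by intro x hx; obtain ⟨g, hg, hxg⟩ := mem_flatMap_rep hx; have := hH₂ g hg; omega)]
      rw [map_flatMap_rep, hfil₁']
    -- one synchronized step, then the induction hypothesis
    have hsum₁ : (adds₁.map (·.2)).sum
        = (if need > 0 then (G₂.map (·.2)).sum + need else (G₂.map (·.2)).sum) := by
      rw [hadds₁]; by_cases hn : need > 0 <;> simp [hn]
    rw [hlen, ← hneed] at hservers
    by_cases hn : need > 0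
    · have := ih (t + 1) adds₁ (answer + need) hsort₁ hinv₁
      rw [hsum₁, if_pos hn] at this
      rw [if_pos hn] at hservers
      simp only [stepA, stepB, hpop, ← hneed, hlen]
      rw [if_pos hn]
      simp only [if_pos hn, hservers, hsliced]
      rw [hadds₁, if_pos hn] at this
      rw [hadds₁, if_pos hn]
      exact this
    · have := ih (t + 1) adds₁ answer hsort₁ hinv₁
      rw [hsum₁, if_neg hn] at this
      rw [if_neg hn] at hservers
      simp only [stepA, stepB, hpop, ← hneed, hlen]
      rw [if_neg hn]
      simp only [if_neg hn, hservers, hsliced]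
      rw [hadds₁, if_neg hn] at this
      rw [hadds₁, if_neg hn]
      exact this

-- ===== VERDICT (by name: the statement is the Claim_ definition above) =====
theorem solution_spec : Claim_equal_solution := by
  intro players m k _ _
  unfold Spec_solution solution solution_alt
  have h0 : ([] : List Int) = reprS 0 [] := rfl
  have := main_lemma m k players 0 [] 0 (List.Pairwise.nil) (by simp)
  simpa using this
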